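-- pv_equiv track=rewrite | github.com/kolemare/RL_Level_2 | part1/dfs.py | dfs
-- ===== SOURCE A (Python) =====
-- def dfs(graph, start_vertex):
--     visited = set()
--     order = []
--     stack = [start_vertex]
--
--     while stack:
--         vertex = stack.pop()
--         if vertex not in visited:
--             visited.add(vertex)
--             order.append(vertex)
--             # Add vertices in reverse order so that the first vertex is processed first
--             stack.extend(reversed(sorted(graph[vertex])))
--
--     return order
-- ===== SOURCE B (Python) =====
-- def dfs(graph, start_vertex):
--     visited = set()
--     order = []
--
--     def visit(vertex):
--         visited.add(vertex)
--         order.append(vertex)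
--         for neighbor in sorted(graph[vertex]):
--             if neighbor not in visited:
--                 visit(neighbor)
--
--     visit(start_vertex)
--     return order
-- ===== Notes on version B (the rewrite author's own statement) =====
-- stated objective: simpler
-- what changed: Replaces A's explicit stack loop (pushing reversed sorted neighbor lists and popping from the end) by a recursive preorder DFS helper that visits a vertex and recurses on its sorted unvisited neighbors.
-- outside the precondition, e.g. on dfs({1: [], 2: [3]}, 1): A returns [1], B returns [1]
import Mathlib
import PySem

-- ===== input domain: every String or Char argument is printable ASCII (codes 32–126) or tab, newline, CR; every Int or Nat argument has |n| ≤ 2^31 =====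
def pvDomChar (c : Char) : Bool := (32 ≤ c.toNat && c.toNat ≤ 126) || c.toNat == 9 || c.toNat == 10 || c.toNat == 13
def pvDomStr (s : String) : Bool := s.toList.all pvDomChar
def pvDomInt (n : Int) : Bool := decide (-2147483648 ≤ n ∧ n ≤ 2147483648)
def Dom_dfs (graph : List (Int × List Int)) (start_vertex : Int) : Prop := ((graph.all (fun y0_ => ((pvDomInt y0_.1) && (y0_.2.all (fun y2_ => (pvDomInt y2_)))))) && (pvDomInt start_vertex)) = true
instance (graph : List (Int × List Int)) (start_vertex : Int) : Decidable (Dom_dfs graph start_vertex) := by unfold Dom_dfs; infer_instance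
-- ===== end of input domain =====

-- B replaces A's explicit stack-with-reversed-pushes loop by a recursive preorder DFS
-- (objective: simpler decomposition; same return value on Pre_). Caveat on B as Python:
-- a graph deeper than Python's recursion limit makes B raise RecursionError where A returns.

-- ===== PORT A =====

-- graph[v] on the dict: first-match association-list lookup (none = KeyError)
def pvLookup (g : List (Int × List Int)) (x : Int) : Option (List Int) :=
  match g with
  | [] => none
  | (k, v) :: rest => if k = x then some v else pvLookup rest x

def pvKeys (g : List (Int × List Int)) : List Int := g.map Prod.fst

-- termination measure: number of graph keys not yet visited
def pvMu (g : List (Int × List Int)) (vis : List Int) : Nat :=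
  ((pvKeys g).toFinset \ vis.toFinset).card

theorem pvLookup_mem_keys {g : List (Int × List Int)} {x : Int} {ns : List Int}
    (h : pvLookup g x = some ns) : x ∈ pvKeys g := by
  induction g with
  | nil => simp [pvLookup] at h
  | cons p rest ih =>
    obtain ⟨k, v⟩ := p
    by_cases hk : k = x
    · simp [pvKeys, hk]
    · simp only [pvLookup, if_neg hk] at h
      simpa [pvKeys] using Or.inr (ih h)

theorem pvToFinset_add (s : PySem.Set Int) (x : Int) :
    (PySem.Set.add s x).toFinset = insert x s.toFinset := by
  by_cases h : x ∈ s
  · rw [PySem.Set.add_of_mem h]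
    exact (Finset.insert_eq_self.mpr (List.mem_toFinset.mpr h)).symm
  · rw [PySem.Set.add_of_not_mem h]
    ext y; simp

theorem pvMu_add_lt {g : List (Int × List Int)} {vis : PySem.Set Int} {x : Int}
    (hx : x ∈ pvKeys g) (hv : x ∉ vis) :
    pvMu g (PySem.Set.add vis x) < pvMu g vis := by
  unfold pvMu
  rw [pvToFinset_add]
  have hsub : (pvKeys g).toFinset \ insert x vis.toFinset ⊆ (pvKeys g).toFinset \ vis.toFinset :=
    Finset.sdiff_subset_sdiff (Finset.Subset.refl _) (Finset.subset_insert _ _)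
  refine Finset.card_lt_card ((Finset.ssubset_iff_of_subset hsub).mpr ⟨x, ?_, ?_⟩)
  · simp [Finset.mem_sdiff, List.mem_toFinset, hx, hv]
  · simp [Finset.mem_sdiff, Finset.mem_insert]

-- the while-loop of A: stack kept in Python order (pop = last element)
def dfsLoopA (g : List (Int × List Int)) (visited : PySem.Set Int)
    (order : List Int) (stack : List Int) : List Int :=
  match stack with
  | [] => order
  | y :: t =>
    -- vertex = stack.pop()  (pop the last element; the rest is the new stack)
    if hv : PySem.Set.contains visited ((y :: t).getLast (by simp)) then
      dfsLoopA g visited order ((y :: t).dropLast)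
    else
      match hns : pvLookup g ((y :: t).getLast (by simp)) with
      | none => order   -- graph[vertex] raises KeyError: excluded by Pre_dfs
      | some ns =>
        dfsLoopA g (PySem.Set.add visited ((y :: t).getLast (by simp)))
          (order ++ [(y :: t).getLast (by simp)])
          ((y :: t).dropLast ++ (PySem.List.sorted ns (fun z => z)).reverse)
termination_by (pvMu g visited, stack.length)
decreasing_by
  · apply Prod.Lex.right
    simp
  · apply Prod.Lex.left
    have hmem : (y :: t).getLast (by simp) ∉ visited := by
      simpa [PySem.Set.contains_iff] using hv
    exact pvMu_add_lt (pvLookup_mem_keys hns) hmem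

def dfs (graph : List (Int × List Int)) (start_vertex : Int) : List Int :=
  dfsLoopA graph PySem.Set.empty [] [start_vertex]

-- ===== PORT B =====

-- recursive preorder DFS (Source B's visit); fuel is only a totality guard, never
-- exhausted when dfs_alt runs it (fuel > number of unvisited keys throughout)
mutual
def dfsVisit (g : List (Int × List Int)) (fuel : Nat) (vis : PySem.Set Int)
    (ord : List Int) (v : Int) : PySem.Set Int × List Int :=
  match fuel with
  | 0 => (vis, ord)   -- fuel guard (unreachable from dfs_alt)
  | f + 1 =>
    let vis' := PySem.Set.add vis v
    let ord' := ord ++ [v]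
    match pvLookup g v with
    | none => (vis', ord')   -- graph[v] raises KeyError: excluded by Pre_dfs
    | some ns => dfsVisitList g f vis' ord' (PySem.List.sorted ns (fun z => z))
termination_by (fuel, 0)
decreasing_by
  · exact Prod.Lex.left _ _ (Nat.lt_succ_self _)

def dfsVisitList (g : List (Int × List Int)) (fuel : Nat) (vis : PySem.Set Int)
    (ord : List Int) (ns : List Int) : PySem.Set Int × List Int :=
  match ns with
  | [] => (vis, ord)
  | n :: rest =>
    if PySem.Set.contains vis n then dfsVisitList g fuel vis ord rest
    else
      let st := dfsVisit g fuel vis ord n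
      dfsVisitList g fuel st.1 st.2 rest
termination_by (fuel, ns.length + 1)
decreasing_by
  · exact Prod.Lex.right _ (Nat.lt_succ_self _)
  · exact Prod.Lex.right _ (Nat.zero_lt_succ _)
  · exact Prod.Lex.right _ (Nat.lt_succ_self _)
end

def dfs_alt (graph : List (Int × List Int)) (start_vertex : Int) : List Int :=
  (dfsVisit graph (graph.length + 1) PySem.Set.empty [] start_vertex).2

-- ===== PRECONDITION & SPEC =====

-- Pre_ excludes the KeyError inputs: A (and B) raise when DFS reaches a vertex that is
-- not a key of graph; Pre_ conservatively requires start_vertex and every listed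
-- neighbour to be a key, so it also drops graphs whose only missing neighbours are
-- unreachable (there A returns and B agrees with it).
def Pre_dfs (graph : List (Int × List Int)) (start_vertex : Int) : Prop :=
  start_vertex ∈ graph.map Prod.fst ∧
  ∀ p ∈ graph, ∀ n ∈ p.2, n ∈ graph.map Prod.fst
instance (graph : List (Int × List Int)) (start_vertex : Int) : Decidable (Pre_dfs graph start_vertex) := by
  unfold Pre_dfs; infer_instance

def pvWitness_dfs : (List (Int × List Int)) × Int := ([(1, [2, 3]), (2, [3]), (3, [])], 1)

def Spec_dfs (graph : List (Int × List Int)) (start_vertex : Int) (out : List Int) : Prop := out = dfs_alt graph start_vertex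
instance (graph : List (Int × List Int)) (start_vertex : Int) (out : List Int) : Decidable (Spec_dfs graph start_vertex out) := by unfold Spec_dfs; infer_instance

-- ===== CLAIM (what is proved, stated in full; the proofs are below) =====
def Claim_equal_dfs : Prop := ∀ (graph : List (Int × List Int)) (start_vertex : Int), Dom_dfs graph start_vertex → Pre_dfs graph start_vertex → Spec_dfs graph start_vertex (dfs graph start_vertex)

-- ===== LEMMAS AND PROOFS =====

theorem pvLookup_mem {g : List (Int × List Int)} {x : Int} {ns : List Int}
    (h : pvLookup g x = some ns) : (x, ns) ∈ g := by
  induction g with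
  | nil => simp [pvLookup] at h
  | cons p rest ih =>
    obtain ⟨k, v⟩ := p
    by_cases hk : k = x
    · simp only [pvLookup, if_pos hk] at h
      subst hk; cases h; simp
    · simp only [pvLookup, if_neg hk] at h
      exact List.mem_cons_of_mem _ (ih h)

theorem pvLookup_isSome {g : List (Int × List Int)} {x : Int}
    (h : x ∈ pvKeys g) : ∃ ns, pvLookup g x = some ns := by
  induction g with
  | nil => simp [pvKeys] at h
  | cons p rest ih =>
    obtain ⟨k, v⟩ := p
    by_cases hk : k = x
    · exact ⟨v, by simp [pvLookup, hk]⟩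
    · have h' : x ∈ pvKeys rest := by
        rcases (by simpa [pvKeys] using h) with h1 | h2
        · exact absurd h1.symm hk
        · simpa [pvKeys] using h2
      rcases ih h' with ⟨ns, hns⟩
      exact ⟨ns, by simp [pvLookup, hk, hns]⟩

theorem pvMu_subset_le {g : List (Int × List Int)} {vis vis' : List Int}
    (h : ∀ y ∈ vis, y ∈ vis') : pvMu g vis' ≤ pvMu g vis := by
  unfold pvMu
  refine Finset.card_le_card (Finset.sdiff_subset_sdiff (Finset.Subset.refl _) ?_)
  intro y hy
  exact List.mem_toFinset.mpr (h y (List.mem_toFinset.mp hy))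

theorem pvMu_add_not_key {g : List (Int × List Int)} {vis : PySem.Set Int} {x : Int}
    (hx : x ∉ pvKeys g) : pvMu g (PySem.Set.add vis x) = pvMu g vis := by
  unfold pvMu
  rw [pvToFinset_add]
  congr 1
  ext y
  simp only [Finset.mem_sdiff, Finset.mem_insert, List.mem_toFinset]
  constructor
  · rintro ⟨hy, h2⟩; exact ⟨hy, fun hv => h2 (Or.inr hv)⟩
  · rintro ⟨hy, h2⟩
    refine ⟨hy, ?_⟩
    rintro (rfl | hv)
    · exact hx hy
    · exact h2 hv

-- head-first reformulation of A's stack machine (top of stack = head), returning the state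
def dfsScan (g : List (Int × List Int)) (vis : PySem.Set Int)
    (ord : List Int) (pending : List Int) : PySem.Set Int × List Int :=
  match pending with
  | [] => (vis, ord)
  | x :: s =>
    if hv : PySem.Set.contains vis x then dfsScan g vis ord s
    else
      dfsScan g (PySem.Set.add vis x) (ord ++ [x])
        (PySem.List.sorted ((pvLookup g x).getD []) (fun z => z) ++ s)
termination_by (pvMu g vis, pending.length)
decreasing_by
  · exact Prod.Lex.right _ (Nat.lt_succ_self _)
  · have hmem : x ∉ vis := by simpa [PySem.Set.contains_iff] using hv
    rcases hns : pvLookup g x with _ | ns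
    · have hkey : x ∉ pvKeys g := fun hk => by
        rcases pvLookup_isSome hk with ⟨ns, h⟩; rw [hns] at h; cases h
      rw [pvMu_add_not_key hkey]
      apply Prod.Lex.right
      simp [List.length_append, PySem.List.length_sorted]
    · exact Prod.Lex.left _ _ (pvMu_add_lt (pvLookup_mem_keys hns) hmem)

theorem pvRevCons (y : Int) (t : List Int) :
    (y :: t).reverse = (y :: t).getLast (by simp) :: ((y :: t).dropLast).reverse := by
  conv_lhs => rw [← List.dropLast_append_getLast (l := y :: t) (by simp)]
  rw [List.reverse_append]
  simp

theorem dfsLoopA_eq_dfsScan (g : List (Int × List Int))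
    (hg : ∀ x ns, pvLookup g x = some ns → ∀ n ∈ ns, n ∈ pvKeys g) :
    ∀ visited order stack, (∀ x ∈ stack, x ∈ pvKeys g) →
      dfsLoopA g visited order stack = (dfsScan g visited order stack.reverse).2 := by
  intro visited order stack
  induction visited, order, stack using dfsLoopA.induct g with
  | case1 vis ord =>
    intro _
    rw [dfsLoopA, List.reverse_nil, dfsScan]
  | case2 vis ord y t hv ih =>
    intro hstack
    rw [dfsLoopA, pvRevCons, dfsScan]
    simp only [dif_pos hv]
    exact ih (fun x hx => hstack x ((List.dropLast_sublist (y :: t)).subset hx))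
  | case3 vis ord y t hv hns =>
    intro hstack
    exfalso
    rcases pvLookup_isSome (hstack _ (List.getLast_mem (by simp))) with ⟨ns, h⟩
    rw [hns] at h
    cases h
  | case4 vis ord y t hv ns hns ih =>
    intro hstack
    rw [dfsLoopA, pvRevCons, dfsScan]
    simp only [dif_neg hv, hns, Option.getD_some]
    split
    · next heq => rw [hns] at heq; cases heq
    · next ns' heq =>
      rw [hns] at heq
      cases heq
      rw [ih ?_]
      · congr 1
        simp [List.reverse_append]
      · intro x hx
        rcases List.mem_append.mp hx with h | h
        · exact hstack x ((List.dropLast_sublist (y :: t)).subset h)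
        · exact hg _ ns hns x (by simpa [PySem.List.mem_sorted] using List.mem_reverse.mp h)

theorem dfsScan_append (g : List (Int × List Int)) :
    ∀ vis ord l1 l2, dfsScan g vis ord (l1 ++ l2) =
      dfsScan g (dfsScan g vis ord l1).1 (dfsScan g vis ord l1).2 l2 := by
  intro vis ord l1
  induction vis, ord, l1 using dfsScan.induct g with
  | case1 vis ord =>
    intro l2
    have h0 : dfsScan g vis ord [] = (vis, ord) := by rw [dfsScan]
    rw [List.nil_append, h0]
  | case2 vis ord x s hv ih =>
    intro l2
    have h0 : dfsScan g vis ord (x :: s) = dfsScan g vis ord s := by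
      rw [dfsScan]; simp only [dif_pos hv]
    rw [List.cons_append, dfsScan, h0]
    simp only [dif_pos hv]
    exact ih l2
  | case3 vis ord x s hv ih =>
    intro l2
    have h0 : dfsScan g vis ord (x :: s) = dfsScan g (PySem.Set.add vis x) (ord ++ [x])
        (PySem.List.sorted ((pvLookup g x).getD []) (fun z => z) ++ s) := by
      rw [dfsScan]; simp only [dif_neg hv]
    rw [List.cons_append, dfsScan, h0]
    simp only [dif_neg hv]
    rw [← List.append_assoc]
    exact ih l2

theorem dfsScan_mono (g : List (Int × List Int)) :
    ∀ vis ord p y, y ∈ vis → y ∈ (dfsScan g vis ord p).1 := by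
  intro vis ord p
  induction vis, ord, p using dfsScan.induct g with
  | case1 vis ord => intro y hy; rw [dfsScan]; exact hy
  | case2 vis ord x s hv ih =>
    intro y hy
    rw [dfsScan]; simp only [dif_pos hv]
    exact ih y hy
  | case3 vis ord x s hv ih =>
    intro y hy
    rw [dfsScan]; simp only [dif_neg hv]
    exact ih y (by simp [PySem.Set.mem_add, hy])

theorem dfsVisitList_eq_dfsScan (g : List (Int × List Int))
    (hg : ∀ x ns, pvLookup g x = some ns → ∀ n ∈ ns, n ∈ pvKeys g) :
    ∀ fuel vis ord pending, (∀ x ∈ pending, x ∈ pvKeys g) → pvMu g vis < fuel →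
      dfsVisitList g fuel vis ord pending = dfsScan g vis ord pending := by
  intro fuel
  induction fuel with
  | zero => intro vis ord pending hp hf; omega
  | succ f ihf =>
    intro vis ord pending
    induction pending generalizing vis ord with
    | nil => intro _ _; rw [dfsVisitList, dfsScan]
    | cons x s ihp =>
      intro hp hf
      by_cases hv : PySem.Set.contains vis x
      · rw [dfsVisitList, dfsScan]
        simp only [if_pos hv, dif_pos hv]
        exact ihp _ _ (fun z hz => hp z (List.mem_cons_of_mem _ hz)) hf
      · have hxk : x ∈ pvKeys g := hp x (List.mem_cons_self)
        have hxv : x ∉ vis := by simpa [PySem.Set.contains_iff] using hv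
        rcases pvLookup_isSome hxk with ⟨ns, hns⟩
        have hlt : pvMu g (PySem.Set.add vis x) < pvMu g vis := pvMu_add_lt hxk hxv
        have hst : dfsVisit g (f + 1) vis ord x =
            dfsScan g (PySem.Set.add vis x) (ord ++ [x]) (PySem.List.sorted ns (fun z => z)) := by
          rw [dfsVisit]
          simp only [hns]
          exact ihf _ _ _
            (fun z hz => hg x ns hns z (by simpa [PySem.List.mem_sorted] using hz))
            (by omega)
        rw [dfsVisitList, dfsScan]
        simp only [if_neg hv, dif_neg hv, hns, Option.getD_some]
        rw [dfsScan_append, hst]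
        refine ihp _ _ (fun z hz => hp z (List.mem_cons_of_mem _ hz)) ?_
        have hsub : pvMu g (dfsScan g (PySem.Set.add vis x) (ord ++ [x]) (PySem.List.sorted ns (fun z => z))).1
            ≤ pvMu g (PySem.Set.add vis x) :=
          pvMu_subset_le (fun y hy => dfsScan_mono g _ _ _ y hy)
        omega

-- ===== VERDICT (by name: the statement is the Claim_ definition above) =====
theorem dfs_spec : Claim_equal_dfs := by
  unfold Claim_equal_dfs
  intro g s _hdom hpre
  obtain ⟨hs, hnb⟩ := hpre
  have hs' : s ∈ pvKeys g := hs
  have hg : ∀ x ns, pvLookup g x = some ns → ∀ n ∈ ns, n ∈ pvKeys g := by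
    intro x ns h n hn
    exact hnb (x, ns) (pvLookup_mem h) n hn
  unfold Spec_dfs dfs dfs_alt
  rw [dfsLoopA_eq_dfsScan g hg _ _ _ (fun x hx => by simp only [List.mem_singleton] at hx; subst hx; exact hs')]
  rcases pvLookup_isSome hs' with ⟨ns, hns⟩
  have hempty : s ∉ (PySem.Set.empty : PySem.Set Int) := by simp [PySem.Set.empty]
  have h1 : pvMu g (PySem.Set.add PySem.Set.empty s) < pvMu g PySem.Set.empty :=
    pvMu_add_lt hs' hempty
  have h2 : pvMu g PySem.Set.empty ≤ g.length := by
    unfold pvMu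
    calc ((pvKeys g).toFinset \ (PySem.Set.empty : PySem.Set Int).toFinset).card
        ≤ (pvKeys g).toFinset.card := Finset.card_le_card (Finset.sdiff_subset)
      _ ≤ (pvKeys g).length := List.toFinset_card_le _
      _ = g.length := by simp [pvKeys]
  have key : dfsScan g PySem.Set.empty [] ([s].reverse) =
      dfsVisit g (g.length + 1) PySem.Set.empty [] s := by
    have hcont : ¬ PySem.Set.contains (PySem.Set.empty : PySem.Set Int) s := by
      simp
    rw [List.reverse_singleton, dfsScan, dfsVisit]
    simp only [dif_neg hcont, hns, Option.getD_some, List.append_nil, List.nil_append]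
    rw [dfsVisitList_eq_dfsScan g hg _ _ _ _
      (fun z hz => hg s ns hns z (by simpa [PySem.List.mem_sorted] using hz))
      (by omega)]
  rw [key]
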